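-- pv_equiv track=rewrite | github.com/luisArthurRodriguesDaSilva/destruidor-de-detran | botoes.py | separar_palavras_traco
-- ===== SOURCE A (Python) =====
-- def remover_barras(word1):
--     word2 = '/'
--     for i in word2:
--         word1 = word1.replace(i, '')
--     return(str(word1))
--
-- def separar_palavras_traco(w):
--   i=0
--   num_of_w=0
--   L_letra_anterior=0
--   palavras=[]
--   for letra in w:
--     i+=1
--     if letra=='-':
--       palavras.append(remover_barras(w[L_letra_anterior:i]))
--       num_of_w+=1
--       L_letra_anterior=i
--   palavras.append(remover_barras(w[L_letra_anterior:i]))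
--   return palavras
-- ===== SOURCE B (Python) =====
-- def separar_palavras_traco(w):
--     # Right-to-left single pass: build pieces char by char (slashes skipped inline),
--     # a '-' starts a new piece so the dash stays at the end of its piece; no slicing,
--     # no per-piece replace pass.
--     pieces = [[]]
--     for ch in reversed(w):
--         if ch == '-':
--             pieces.append(['-'])
--         elif ch != '/':
--             pieces[-1].append(ch)
--     return [''.join(reversed(p)) for p in reversed(pieces)]
-- ===== Notes on version B (the rewrite author's own statement) =====
-- stated objective: alternative
-- what changed: Instead of a left-to-right index scan that slices the original string at each dash and then strips slashes with a per-piece replace pass, B makes one right-to-left pass building each piece character by character (skipping slashes inline), starting a fresh piece at every dash, and reverses the result.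
import Mathlib
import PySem

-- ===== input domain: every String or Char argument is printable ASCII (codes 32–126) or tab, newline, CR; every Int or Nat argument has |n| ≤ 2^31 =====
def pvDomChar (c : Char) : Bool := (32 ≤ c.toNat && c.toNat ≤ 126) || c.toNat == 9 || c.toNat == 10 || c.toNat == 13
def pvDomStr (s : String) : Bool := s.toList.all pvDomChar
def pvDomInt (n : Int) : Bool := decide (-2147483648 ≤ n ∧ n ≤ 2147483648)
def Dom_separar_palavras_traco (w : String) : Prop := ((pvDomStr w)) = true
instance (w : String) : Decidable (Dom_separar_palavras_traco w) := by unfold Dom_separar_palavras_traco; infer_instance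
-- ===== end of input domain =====

-- B replaces A's left-to-right index scan with string slicing and a per-piece replace pass
-- by a single right-to-left pass that builds pieces char by char, skipping '/' inline.

-- ===== PORT A =====
-- remover_barras: for i in '/': word1 = word1.replace(i, '')
def remover_barras (word1 : String) : String :=
  ("/".toList).foldl (fun w1 i => PySem.Str.replace w1 (String.ofList [i]) "") word1

-- one iteration of A's 'for letra in w' loop; state = (i, L_letra_anterior, palavras)
-- (the dead counter num_of_w is omitted: it is never read)
def sepStepA (w : String) (s : Int × Int × List String) (letra : Char) : Int × Int × List String :=
  let i := s.1 + 1
  if letra = '-' then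
    (i, i, s.2.2 ++ [remover_barras (PySem.Str.slice w (some s.2.1) (some i))])
  else (i, s.2.1, s.2.2)

def separar_palavras_traco (w : String) : List String :=
  let st := w.toList.foldl (sepStepA w) (0, 0, [])
  st.2.2 ++ [remover_barras (PySem.Str.slice w (some st.2.1) (some st.1))]

-- ===== PORT B =====
-- pieces[-1].append(ch): append ch to the last piece
def appendLast (pieces : List (List Char)) (ch : Char) : List (List Char) :=
  match pieces with
  | [] => []
  | [p] => [p ++ [ch]]
  | p :: rest => p :: appendLast rest ch

-- one iteration of B's 'for ch in reversed(w)' loop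
def sepStepB (ps : List (List Char)) (ch : Char) : List (List Char) :=
  if ch = '-' then ps ++ [['-']]
  else if ch = '/' then ps
  else appendLast ps ch

def separar_palavras_traco_alt (w : String) : List String :=
  let pieces := (w.toList.reverse).foldl sepStepB [[]]
  (pieces.reverse).map (fun p => String.ofList p.reverse)

-- ===== PRECONDITION & SPEC =====
def Spec_separar_palavras_traco (w : String) (out : List String) : Prop := out = separar_palavras_traco_alt w
instance (w : String) (out : List String) : Decidable (Spec_separar_palavras_traco w out) := by unfold Spec_separar_palavras_traco; infer_instance

-- ===== CLAIM (what is proved, stated in full; the proofs are below) =====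
def Claim_equal_separar_palavras_traco : Prop := ∀ (w : String), Dom_separar_palavras_traco w → Spec_separar_palavras_traco w (separar_palavras_traco w)

-- ===== LEMMAS AND PROOFS =====

-- the common characterisation both ports are reduced to: split after each '-', dash kept
def splitAfterDash : List Char → List (List Char)
  | [] => [[]]
  | c :: rest =>
    if c = '-' then [c] :: splitAfterDash rest
    else
      match splitAfterDash rest with
      | p :: ps => (c :: p) :: ps
      | [] => [[c]]

-- ---- A side: A equals splitAfterDash + per-piece replace ----

theorem remover_eq (s : String) : remover_barras s = PySem.Str.replace s "/" "" := rfl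

theorem splitAfterDash_no_dash (p : List Char) (h : '-' ∉ p) : splitAfterDash p = [p] := by
  induction p with
  | nil => rfl
  | cons c t ih =>
    have hc : ¬ c = '-' := fun hc => h (hc ▸ List.mem_cons_self ..)
    simp [splitAfterDash, hc, ih (fun ht => h (List.mem_cons_of_mem _ ht))]

theorem splitAfterDash_append_dash (p rest : List Char) (h : '-' ∉ p) :
    splitAfterDash (p ++ '-' :: rest) = (p ++ ['-']) :: splitAfterDash rest := by
  induction p with
  | nil => simp [splitAfterDash]
  | cons c t ih =>
    have hc : ¬ c = '-' := fun hc => h (hc ▸ List.mem_cons_self ..)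
    simp [splitAfterDash, hc, ih (fun ht => h (List.mem_cons_of_mem _ ht))]

-- the slice w[l:k] the A-loop takes is exactly the chars since the last '-'
theorem slice_of_split (w : String) (u rem : List Char) (l : Nat)
    (hw : w.toList = u ++ rem) (hl : l ≤ u.length) :
    PySem.Str.slice w (some (l : Int)) (some (u.length : Int)) = String.ofList (u.drop l) := by
  have : PySem.Str.slice w (some (l : Int)) (some (u.length : Int))
      = String.ofList (PySem.List.slice w.toList (some (l : Int)) (some (u.length : Int))) := rfl
  rw [this, hw, PySem.List.slice_natCast]
  congr 1
  rw [List.drop_append_of_le_length hl]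
  have hlen : (u.drop l).length = u.length - l := by simp
  rw [← hlen]
  simp

-- the loop invariant: u is the consumed prefix, l the index after the last '-',
-- u.drop l (dash-free) is the piece under construction
theorem loopA (w : String) (rem : List Char) : ∀ (u : List Char) (l : Nat) (acc : List String),
    w.toList = u ++ rem → l ≤ u.length → '-' ∉ u.drop l →
    (let st := rem.foldl (sepStepA w) ((u.length : Int), (l : Int), acc)
     st.2.2 ++ [remover_barras (PySem.Str.slice w (some st.2.1) (some st.1))])
    = acc ++ (splitAfterDash (u.drop l ++ rem)).map
        (fun piece => PySem.Str.replace (String.ofList piece) "/" "") := by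
  induction rem with
  | nil =>
    intro u l acc hw hl hnd
    simp only [List.foldl_nil, List.append_nil]
    rw [splitAfterDash_no_dash _ hnd, slice_of_split w u [] l (by simpa using hw) hl,
      remover_eq]
    simp
  | cons c rest ih =>
    intro u l acc hw hl hnd
    simp only [List.foldl_cons]
    by_cases hc : c = '-'
    · subst hc
      have hstep : sepStepA w ((u.length : Int), (l : Int), acc) '-'
          = (((u ++ ['-']).length : Int), ((u ++ ['-']).length : Int),
             acc ++ [remover_barras (PySem.Str.slice w (some (l : Int)) (some ((u ++ ['-']).length : Int)))]) := by
        simp [sepStepA]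
      rw [hstep, ih (u ++ ['-']) (u ++ ['-']).length
        (acc ++ [remover_barras (PySem.Str.slice w (some (l : Int)) (some ((u ++ ['-']).length : Int)))])
        (show w.toList = (u ++ ['-']) ++ rest by simpa using hw) le_rfl (by simp)]
      rw [slice_of_split w (u ++ ['-']) rest l (by simpa using hw) (le_trans hl (by simp)),
        splitAfterDash_append_dash _ rest hnd, remover_eq]
      simp [List.drop_append_of_le_length hl]
    · have hstep : sepStepA w ((u.length : Int), (l : Int), acc) c
          = (((u ++ [c]).length : Int), (l : Int), acc) := by
        simp [sepStepA, hc]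
      have hnd' : '-' ∉ (u ++ [c]).drop l := by
        rw [List.drop_append_of_le_length hl]
        intro hmem
        rcases List.mem_append.mp hmem with h1 | h1
        · exact hnd h1
        · exact hc (List.mem_singleton.mp h1).symm
      rw [hstep, ih (u ++ [c]) l acc (show w.toList = (u ++ [c]) ++ rest by simpa using hw)
        (le_trans hl (by simp)) hnd']
      simp [List.drop_append_of_le_length hl]

theorem a_eq_split (w : String) :
    separar_palavras_traco w
      = (splitAfterDash w.toList).map
          (fun piece => PySem.Str.replace (String.ofList piece) "/" "") := by
  have h := loopA w w.toList [] 0 [] (by simp) (by simp) (by simp)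
  simpa [separar_palavras_traco] using h

-- ---- stripping '/' : replace s "/" "" is the filter keeping non-'/' chars ----

theorem replace_go_slash (fuel : Nat) : ∀ (l acc : List Char), l.length ≤ fuel →
    PySem.Chars.replace.go ['/'] [] fuel l acc
      = acc.reverse ++ l.filter (fun c => c ≠ '/') := by
  induction fuel with
  | zero =>
    intro l acc hl
    have : l = [] := List.eq_nil_of_length_eq_zero (Nat.le_zero.mp hl)
    subst this; simp [PySem.Chars.replace.go]
  | succ n ih =>
    intro l acc hl
    cases l with
    | nil => simp [PySem.Chars.replace.go]
    | cons c t =>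
      by_cases hc : c = '/'
      · subst hc
        have hpre : List.isPrefixOf ['/'] ('/' :: t) = true := by simp [List.isPrefixOf]
        simp only [PySem.Chars.replace.go, hpre, if_pos]
        rw [show List.drop ['/'].length ('/' :: t) = t from rfl,
          show ([].reverse ++ acc : List Char) = acc from rfl,
          ih t acc (by simpa using Nat.lt_succ_iff.mp (by simpa using hl))]
        simp
      · have hpre : List.isPrefixOf ['/'] (c :: t) = false := by
          simp [List.isPrefixOf]; exact fun h => hc h.symm
        simp only [PySem.Chars.replace.go, hpre]
        rw [if_neg (by simp), ih t (c :: acc) (by simpa using Nat.lt_succ_iff.mp (by simpa using hl))]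
        simp [hc]

theorem replace_slash (p : List Char) :
    PySem.Str.replace (String.ofList p) "/" "" = String.ofList (p.filter (fun c => c ≠ '/')) := by
  have h1 : (String.ofList p).toList = p := by simp
  show String.ofList (PySem.Chars.replace (String.ofList p).toList "/".toList "".toList)
      = String.ofList (p.filter (fun c => c ≠ '/'))
  rw [h1]
  have : PySem.Chars.replace p ['/'] [] = PySem.Chars.replace.go ['/'] [] p.length p [] := by
    simp [PySem.Chars.replace]
  simp only [show "/".toList = ['/'] from rfl, show "".toList = [] from rfl, this,
    replace_go_slash p.length p [] le_rfl, List.reverse_nil, List.nil_append]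

-- ---- B side: B equals splitAfterDash + filter ----

theorem appendLast_append (xs : List (List Char)) (x : List Char) (ch : Char) :
    appendLast (xs ++ [x]) ch = xs ++ [x ++ [ch]] := by
  induction xs with
  | nil => rfl
  | cons y ys ih =>
    cases ys with
    | nil => simp [appendLast]
    | cons z zs => simpa [appendLast] using ih

theorem splitAfterDash_ne_nil (l : List Char) : splitAfterDash l ≠ [] := by
  cases l with
  | nil => simp [splitAfterDash]
  | cons c rest =>
    by_cases hc : c = '-'
    · simp [splitAfterDash, hc]
    · simp only [splitAfterDash, if_neg hc]
      cases h : splitAfterDash rest with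
      | nil => simp
      | cons p ps => simp

theorem loopB (l : List Char) :
    l.foldr (fun ch ps => sepStepB ps ch) [[]]
      = ((splitAfterDash l).map (fun p => (p.filter (fun c => c ≠ '/')).reverse)).reverse := by
  induction l with
  | nil => simp [splitAfterDash]
  | cons c rest ih =>
    simp only [List.foldr_cons, ih]
    by_cases hc : c = '-'
    · subst hc
      simp [sepStepB, splitAfterDash]
    · obtain ⟨p, ps, hps⟩ : ∃ p ps, splitAfterDash rest = p :: ps := by
        cases h : splitAfterDash rest with
        | nil => exact absurd h (splitAfterDash_ne_nil rest)
        | cons p ps => exact ⟨p, ps, rfl⟩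
      by_cases hs : c = '/'
      · subst hs
        simp [sepStepB, splitAfterDash, hc, hps]
      · simp only [sepStepB, if_neg hc, if_neg hs, splitAfterDash, hps]
        rw [show (((p :: ps).map (fun p => (p.filter (fun c => c ≠ '/')).reverse)).reverse)
            = (ps.map (fun p => (p.filter (fun c => c ≠ '/')).reverse)).reverse
              ++ [(p.filter (fun c => c ≠ '/')).reverse] by simp,
          appendLast_append]
        simp [hs]

theorem b_eq_split (w : String) :
    separar_palavras_traco_alt w
      = (splitAfterDash w.toList).map (fun p => String.ofList (p.filter (fun c => c ≠ '/'))) := by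
  show ((w.toList.reverse.foldl sepStepB [[]]).reverse).map (fun p => String.ofList p.reverse)
      = _
  rw [List.foldl_reverse, loopB w.toList]
  simp [List.map_map, Function.comp]

-- ===== VERDICT (by name: the statement is the Claim_ definition above) =====
theorem separar_palavras_traco_spec : Claim_equal_separar_palavras_traco := by
  intro w _
  show separar_palavras_traco w = separar_palavras_traco_alt w
  rw [a_eq_split, b_eq_split]
  exact List.map_congr_left (fun p _ => replace_slash p)
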